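-- pv_equiv track=rewrite | github.com/zhangke-zhangke/ownCode | csv转换/mapValue.py | tradeTime
-- ===== SOURCE A (Python) =====
-- def tradeTime(x):
--     x = str(x).replace('t', '0')
--     if len(x) != 14:
--         x = x.ljust(14,'0')
--
--     # 取时间内容，然后处理为 HH:MM:SS
--     retunTime = str(x)[8:]
--     transformTime = ''
--     for c,i in enumerate(retunTime):
--         transformTime += i
--         if (c + 1) % 2 == 0 and c != len(retunTime) -1:
--             transformTime += ':'
--     return transformTime
-- ===== SOURCE B (Python) =====
-- def tradeTime(x):
--     x = str(x).replace('t', '0')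
--     if len(x) != 14:
--         x = x.ljust(14, '0')
--     tail = x[8:]
--     return ':'.join(tail[i:i+2] for i in range(0, len(tail), 2))
-- ===== Notes on version B (the rewrite author's own statement) =====
-- stated objective: simpler
-- what changed: Replaces the per-character accumulation loop with its modulo/last-index colon test by slicing the tail into strided 2-character chunks and joining them with the colon separator; the chunk-and-join pass avoids per-character string concatenation and branching.
import Mathlib
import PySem

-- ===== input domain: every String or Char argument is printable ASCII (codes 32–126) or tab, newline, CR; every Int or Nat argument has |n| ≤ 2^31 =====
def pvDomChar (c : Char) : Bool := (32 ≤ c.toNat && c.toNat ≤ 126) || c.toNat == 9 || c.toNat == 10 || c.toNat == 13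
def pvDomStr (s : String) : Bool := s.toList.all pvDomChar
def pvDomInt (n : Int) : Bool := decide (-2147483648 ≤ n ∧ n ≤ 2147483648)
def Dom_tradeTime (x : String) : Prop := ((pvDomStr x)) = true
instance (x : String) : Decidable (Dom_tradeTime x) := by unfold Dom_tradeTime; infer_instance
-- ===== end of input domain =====

-- B replaces A's per-character loop (with its modulo/last-index colon test) by slicing the
-- tail into 2-character chunks and joining them with the colon separator — simpler, same cost.

-- ===== PORT A =====
def tradeTime (x : String) : String :=
  let cs := PySem.Chars.replace x.toList ['t'] ['0']
  -- x.ljust(14,'0') ported by hand: pad on the right with '0' to width 14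
  -- (exact: Nat subtraction clamps to 0, matching ljust's no-op when len(x) > 14)
  let cs := if cs.length ≠ 14 then cs ++ List.replicate (14 - cs.length) '0' else cs
  let retunTime := PySem.List.slice cs (some 8) none
  let transformTime := (PySem.List.enumerate retunTime).foldl
    (fun acc ci =>
      let acc2 := acc ++ [ci.2]
      if PySem.Int.mod (ci.1 + 1) 2 = 0 ∧ ci.1 ≠ (retunTime.length : Int) - 1 then
        acc2 ++ [':']
      else acc2)
    []
  String.ofList transformTime

-- ===== PORT B =====
def tradeTime_alt (x : String) : String :=
  let cs := PySem.Chars.replace x.toList ['t'] ['0']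
  -- x.ljust(14,'0') ported by hand, as in port A
  let cs := if cs.length ≠ 14 then cs ++ List.replicate (14 - cs.length) '0' else cs
  let tail := PySem.List.slice cs (some 8) none
  String.ofList (PySem.Chars.join [':']
    ((PySem.List.pyRange 0 (tail.length) 2).map
      (fun i => PySem.List.slice tail (some i) (some (i + 2)))))

-- ===== PRECONDITION & SPEC =====
def Spec_tradeTime (x : String) (out : String) : Prop := out = tradeTime_alt x
instance (x : String) (out : String) : Decidable (Spec_tradeTime x out) := by unfold Spec_tradeTime; infer_instance

-- ===== CLAIM (what is proved, stated in full; the proofs are below) =====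
def Claim_equal_tradeTime : Prop := ∀ (x : String), Dom_tradeTime x → Spec_tradeTime x (tradeTime x)

-- ===== LEMMAS AND PROOFS =====

-- The common value of both passes over the tail: chars in pairs, ':' between pairs.
def pvS : List Char → List Char
  | [] => []
  | [a] => [a]
  | a :: b :: t => a :: b :: (if t = [] then [] else ':' :: pvS t)

-- A's loop over `enumerate`, started at an even index 2k, yields `acc ++ pvS t`
-- (n is the total length, fixed throughout the fold).
lemma pvLoopA (n : Int) (t : List Char) : ∀ (k : Nat) (acc : List Char),
    2 * (k : Int) + t.length = n →
    (PySem.List.enumerate t (2 * (k : Int))).foldl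
      (fun acc ci =>
        let acc2 := acc ++ [ci.2]
        if PySem.Int.mod (ci.1 + 1) 2 = 0 ∧ ci.1 ≠ n - 1 then acc2 ++ [':'] else acc2)
      acc
    = acc ++ pvS t := by
  induction t using pvS.induct with
  | case1 => intro k acc h; simp [PySem.List.enumerate_nil, pvS]
  | case2 a =>
    intro k acc h
    simp only [PySem.List.enumerate_cons, PySem.List.enumerate_nil, List.foldl_cons,
      List.foldl_nil, pvS]
    have h1 : ¬ (PySem.Int.mod (2 * (k : Int) + 1) 2 = 0 ∧ 2 * (k : Int) ≠ n - 1) := by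
      rintro ⟨hm, -⟩
      rw [PySem.Int.mod_eq_emod_of_pos (by norm_num)] at hm
      omega
    rw [if_neg h1]
  | case3 a b t ih =>
    intro k acc h
    simp only [PySem.List.enumerate_cons, List.foldl_cons, pvS, List.length_cons] at h ⊢
    have h1 : ¬ (PySem.Int.mod (2 * (k : Int) + 1) 2 = 0 ∧ 2 * (k : Int) ≠ n - 1) := by
      rintro ⟨hm, -⟩
      rw [PySem.Int.mod_eq_emod_of_pos (by norm_num)] at hm
      omega
    rw [if_neg h1]
    push_cast at h
    by_cases ht : t = []
    · subst ht
      simp only [List.length_nil] at h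
      have h2 : ¬ (PySem.Int.mod (2 * (k : Int) + 1 + 1) 2 = 0 ∧
          2 * (k : Int) + 1 ≠ n - 1) := by
        rintro ⟨-, hne⟩
        exact hne (by omega)
      rw [if_neg h2]
      simp [PySem.List.enumerate_nil]
    · have hl : t.length ≠ 0 := by simpa [List.length_eq_zero_iff] using ht
      have h2 : PySem.Int.mod (2 * (k : Int) + 1 + 1) 2 = 0 ∧
          2 * (k : Int) + 1 ≠ n - 1 := by
        constructor
        · rw [PySem.Int.mod_eq_emod_of_pos (by norm_num)]; omega
        · intro he; omega
      rw [if_pos h2]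
      rw [show (2 * (k : Int) + 1 + 1) = 2 * ((k + 1 : Nat) : Int) from by push_cast; ring]
      rw [ih (k + 1) _ (by push_cast; omega)]
      simp [ht]

-- Number of 2-chunks of a list of length n
def pvCl (t : List Char) : Nat := (t.length + 1) / 2

def pvChunks (t : List Char) : List (List Char) :=
  (List.range (pvCl t)).map (fun k => (t.drop (2 * k)).take 2)

-- B's pyRange/slice expression computes exactly pvChunks.
lemma pvChunks_eq (t : List Char) :
    (PySem.List.pyRange 0 (t.length) 2).map
      (fun i => PySem.List.slice t (some i) (some (i + 2)))
    = pvChunks t := by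
  rw [PySem.List.pyRange_of_pos 0 (t.length : Int) (s := 2) (by norm_num), List.map_map]
  have hm : (if (0 : Int) < (t.length : Int) then
      (((t.length : Int) - 0 + 2 - 1) / 2).toNat else 0) = pvCl t := by
    unfold pvCl
    by_cases h : (0 : Int) < (t.length : Int)
    · rw [if_pos h]; omega
    · rw [if_neg h]; omega
  rw [hm]
  unfold pvChunks
  apply List.map_congr_left
  intro k _
  simp only [Function.comp_apply, zero_add]
  rw [show (2 * (k : Int)) = ((2 * k : Nat) : Int) from by push_cast; ring,
      show (((2 * k : Nat) : Int) + 2) = ((2 * k : Nat) : Int) + ((2 : Nat) : Int) from by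
        push_cast; ring,
      PySem.List.slice_natCast_add]

lemma pvChunks_cons_cons (a b : Char) (t : List Char) :
    pvChunks (a :: b :: t) = [a, b] :: pvChunks t := by
  have hcl : pvCl (a :: b :: t) = pvCl t + 1 := by unfold pvCl; simp; omega
  unfold pvChunks
  rw [hcl, List.range_succ_eq_map]
  simp only [List.map_cons, List.map_map]
  congr 1

lemma pvChunks_ne_nil {t : List Char} (h : t ≠ []) : pvChunks t ≠ [] := by
  unfold pvChunks pvCl
  have hl : t.length ≠ 0 := by simpa [List.length_eq_zero_iff] using h
  simp [List.range_eq_nil]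
  omega

lemma pvJoin_chunks (t : List Char) :
    PySem.Chars.join [':'] (pvChunks t) = pvS t := by
  induction t using pvS.induct with
  | case1 => simp [pvChunks, pvCl, PySem.Chars.join_nil, pvS]
  | case2 a => simp [pvChunks, pvCl, PySem.Chars.join_singleton, pvS]
  | case3 a b t ih =>
    rw [pvChunks_cons_cons, pvS]
    by_cases ht : t = []
    · subst ht
      simp [pvChunks, pvCl, PySem.Chars.join_singleton]
    · obtain ⟨c, rest, hcr⟩ := List.exists_cons_of_ne_nil (pvChunks_ne_nil ht)
      rw [hcr, PySem.Chars.join_cons_cons, ← hcr, ih]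
      simp [ht]

-- The two passes over the same tail produce the same characters.
lemma pvMain (l : List Char) :
    (PySem.List.enumerate l).foldl
      (fun acc ci =>
        let acc2 := acc ++ [ci.2]
        if PySem.Int.mod (ci.1 + 1) 2 = 0 ∧ ci.1 ≠ (l.length : Int) - 1 then
          acc2 ++ [':']
        else acc2)
      []
    = PySem.Chars.join [':']
        ((PySem.List.pyRange 0 (l.length) 2).map
          (fun i => PySem.List.slice l (some i) (some (i + 2)))) := by
  rw [pvChunks_eq, pvJoin_chunks]
  have h := pvLoopA (l.length : Int) l 0 [] (by push_cast; ring)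
  simpa using h

-- ===== VERDICT (by name: the statement is the Claim_ definition above) =====
theorem tradeTime_spec : Claim_equal_tradeTime := by
  intro x _
  show tradeTime x = tradeTime_alt x
  simp only [tradeTime, tradeTime_alt]
  exact congrArg String.ofList (pvMain _)
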